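-- pv_equiv track=rewrite | github.com/davidcoates/advent-of-code-2024 | Day17/main.py | find_quines_rec
-- ===== SOURCE A (Python) =====
-- def run(registers, _):
--     ( A, _, _ ) = registers
--     out = []
--     X = A >> ((A % 8) ^ 7)
--     Y = (A % 8) ^ X
--     out.append(Y % 8)
--     A = A >> 3
--     while A != 0:
--         X = A >> ((A % 8) ^ 7)
--         Y = (A % 8) ^ X
--         out.append(Y % 8)
--         A = A >> 3
--     return out
--
-- def find_quines_rec(program, i, low, low_bits):
--     for high in range(2**3):
--         a = (high << low_bits) + low
--         out = run((a, 0, 0), program)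
--         if i < len(out) and out[i] == program[i]:
--             if i == len(program) - 1:
--                 yield a
--             else:
--                 yield from find_quines_rec(program, i + 1, a, low_bits + 3)
-- ===== SOURCE B (Python) =====
-- def find_quines_rec(program, i, low, low_bits):
--     # Compute the i-th VM output digit directly from a >> (3*i) instead of
--     # rerunning the whole VM for every candidate.
--     for high in range(8):
--         a = (high << low_bits) + low
--         h = a >> (3 * i)
--         if (i == 0 or h != 0) and ((h % 8) ^ (h >> ((h % 8) ^ 7))) % 8 == program[i]:
--             if i == len(program) - 1:
--                 yield a
--             else:
--                 yield from find_quines_rec(program, i + 1, a, low_bits + 3)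
-- ===== Notes on version B (the rewrite author's own statement) =====
-- stated objective: faster
-- what changed: Instead of rerunning the whole VM (run()) to build the full output list at every search node, B computes the single output digit out[i] directly from a >> (3*i) in O(1), keeping the same recursive 3-bit search.
-- outside the precondition, e.g. on find_quines_rec([3], -1, 0, 0): A returns [3, 11], B raises ValueError; on find_quines_rec([1], 20, 0, 50): A returns [], B returns []
import Mathlib
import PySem

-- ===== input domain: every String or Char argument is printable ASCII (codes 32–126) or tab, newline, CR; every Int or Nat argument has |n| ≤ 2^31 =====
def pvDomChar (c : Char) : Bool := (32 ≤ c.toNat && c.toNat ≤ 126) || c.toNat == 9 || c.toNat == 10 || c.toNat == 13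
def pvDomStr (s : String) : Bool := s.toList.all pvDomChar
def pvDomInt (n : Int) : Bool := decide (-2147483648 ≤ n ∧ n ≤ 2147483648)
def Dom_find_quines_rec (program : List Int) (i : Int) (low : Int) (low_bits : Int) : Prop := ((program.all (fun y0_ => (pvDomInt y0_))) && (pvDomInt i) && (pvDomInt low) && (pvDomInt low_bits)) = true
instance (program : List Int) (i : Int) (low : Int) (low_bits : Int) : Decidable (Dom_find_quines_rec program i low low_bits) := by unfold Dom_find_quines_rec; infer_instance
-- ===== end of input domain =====

-- B computes the single needed VM output digit out[i] directly from a >> (3*i) instead of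
-- rerunning the whole VM (building the full output list) at every search node; same results.

-- ===== PORT A =====

-- one VM step's output digit: Y % 8 where X = A >> ((A % 8) ^ 7), Y = (A % 8) ^ X
-- (the shift amount (A % 8) ^ 7 is always in 0..7, so .toNat is exact)
def pvDigitA (a : Int) : Int :=
  let x := a >>> (PySem.Int.bxor (PySem.Int.mod a 8) 7).toNat
  PySem.Int.mod (PySem.Int.bxor (PySem.Int.mod a 8) x) 8

-- termination fact for the port's while loop (cited in decreasing_by)
theorem pvShr3_toNat_lt (a : Int) (h : ¬ a ≤ 0) : (a >>> (3 : Nat)).toNat < a.toNat := by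
  have he : a >>> (3 : Nat) = a / 2 ^ 3 := Int.shiftRight_eq_div_pow a 3
  have h8 : (2 : Int) ^ 3 = 8 := by norm_num
  rw [he, h8]; omega

-- the 'while A != 0' loop of run; for A < 0 the Python loop never terminates
-- (such inputs lie outside Pre_), so the port stops on a ≤ 0 instead of a = 0
def pvRunLoop (a : Int) : List Int :=
  if h : a ≤ 0 then []
  else pvDigitA a :: pvRunLoop (a >>> (3 : Nat))
termination_by a.toNat
decreasing_by exact pvShr3_toNat_lt _ h

-- run((a, 0, 0), _): first output digit unconditionally, then the while loop on A >> 3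
def pvRun (a : Int) : List Int :=
  pvDigitA a :: pvRunLoop (a >>> (3 : Nat))

-- the recursive search; fuel = remaining recursion depth (inside Pre_ that depth is exactly
-- program.length - i, the fuel the wrapper passes; fuel only makes the port total)
def pvGoA (program : List Int) (fuel : Nat) (i low low_bits : Int) : List Int :=
  match fuel with
  | 0 => []
  | fuel + 1 =>
    (PySem.List.pyRange 0 8 1).foldl (fun acc (high : Int) =>
      -- a = (high << low_bits) + low  (Python raises for low_bits < 0: outside Pre_)
      let a : Int := (high <<< low_bits.toNat) + low
      let out := pvRun a
      -- out[i] / program[i]: in range under Pre_, so pyGetD is exact there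
      if i < (out.length : Int) ∧ PySem.List.pyGetD out i 0 = PySem.List.pyGetD program i 0 then
        if i = (program.length : Int) - 1 then acc ++ [a]
        else acc ++ pvGoA program fuel (i + 1) a (low_bits + 3)
      else acc) []

def find_quines_rec (program : List Int) (i : Int) (low : Int) (low_bits : Int) : List Int :=
  pvGoA program (program.length - i.toNat) i low low_bits

-- ===== PORT B =====

def pvGoB (program : List Int) (fuel : Nat) (i low low_bits : Int) : List Int :=
  match fuel with
  | 0 => []
  | fuel + 1 =>
    (PySem.List.pyRange 0 8 1).foldl (fun acc (high : Int) =>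
      let a : Int := (high <<< low_bits.toNat) + low
      -- h = a >> (3*i): the VM state from which output digit i is produced
      let h := a >>> (3 * i).toNat
      if (i = 0 ∨ h ≠ 0) ∧
          PySem.Int.mod (PySem.Int.bxor (PySem.Int.mod h 8)
            (h >>> (PySem.Int.bxor (PySem.Int.mod h 8) 7).toNat)) 8
            = PySem.List.pyGetD program i 0 then
        if i = (program.length : Int) - 1 then acc ++ [a]
        else acc ++ pvGoB program fuel (i + 1) a (low_bits + 3)
      else acc) []

def find_quines_rec_alt (program : List Int) (i : Int) (low : Int) (low_bits : Int) : List Int :=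
  pvGoB program (program.length - i.toNat) i low low_bits

-- ===== PRECONDITION & SPEC =====
-- Pre_ excludes: negative i — Python reads out[i]/program[i] by index wraparound where B raises
-- ValueError on the negative shift amount; negative low — A's run() loop never terminates;
-- negative low_bits — high << low_bits raises ValueError in both; and i ≥ len(program) when the
-- largest candidate a = 7*2^low_bits + low can reach output position i (a ≥ 8^i), where A raises
-- IndexError on program[i].  i ≥ len(program) with every candidate's output shorter than i stays
-- inside Pre_ (both return []); the disjunct 3*i ≥ low_bits + 37 is a cheap sufficient bound for
-- a < 8^i (inside Dom_, low ≤ 2^31, so 7*2^low_bits + low < 2^(low_bits+37) ≤ 8^i), and the exact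
-- power comparison is only used under i, low_bits ≤ 40 so that it stays computable; this
-- conservative cap also drops a few large-exponent inputs on which A returns [] (as does B).
def Pre_find_quines_rec (program : List Int) (i : Int) (low : Int) (low_bits : Int) : Prop :=
  0 ≤ i ∧ 0 ≤ low ∧ 0 ≤ low_bits ∧
  (i < (program.length : Int) ∨ low_bits + 37 ≤ 3 * i ∨
    (i ≤ 40 ∧ low_bits ≤ 40 ∧ 7 * 2 ^ low_bits.toNat + low < 8 ^ i.toNat))
instance (program : List Int) (i : Int) (low : Int) (low_bits : Int) : Decidable (Pre_find_quines_rec program i low low_bits) := by unfold Pre_find_quines_rec; infer_instance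

def pvWitness_find_quines_rec : List Int × Int × Int × Int := ([4, 0], 0, 0, 0)

def Spec_find_quines_rec (program : List Int) (i : Int) (low : Int) (low_bits : Int) (out : List Int) : Prop := out = find_quines_rec_alt program i low low_bits
instance (program : List Int) (i : Int) (low : Int) (low_bits : Int) (out : List Int) : Decidable (Spec_find_quines_rec program i low low_bits out) := by unfold Spec_find_quines_rec; infer_instance

-- ===== CLAIM (what is proved, stated in full; the proofs are below) =====
def Claim_equal_find_quines_rec : Prop := ∀ (program : List Int) (i : Int) (low : Int) (low_bits : Int), Dom_find_quines_rec program i low low_bits → Pre_find_quines_rec program i low low_bits → Spec_find_quines_rec program i low low_bits (find_quines_rec program i low low_bits)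

-- ===== LEMMAS AND PROOFS =====

-- the k-th element of the while loop's output: the digit of a / 8^k while that is nonzero
theorem pvRunLoop_getElem? (k : Nat) : ∀ (a : Int), 0 ≤ a →
    (pvRunLoop a)[k]? = if a / 8 ^ k ≤ 0 then none else some (pvDigitA (a / 8 ^ k)) := by
  induction k with
  | zero =>
    intro a ha
    rw [pvRunLoop.eq_def]
    by_cases h : a ≤ 0
    · simp [h, pow_zero]
    · simp [h, pow_zero]
  | succ k ih =>
    intro a ha
    rw [pvRunLoop.eq_def]
    by_cases h : a ≤ 0
    · have hz : a = 0 := by omega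
      simp [hz]
    · have h8 : a >>> (3 : Nat) = a / 8 := by
        have he := Int.shiftRight_eq_div_pow a 3; norm_num at he; exact he
      have hnn : 0 ≤ a / 8 := Int.ediv_nonneg (by omega) (by norm_num)
      have hdd : a / 8 / 8 ^ k = a / 8 ^ (k + 1) := by
        rw [Int.ediv_ediv_of_nonneg (show (0:Int) ≤ 8 by norm_num), ← pow_succ']
      rw [dif_neg h]
      simp only [List.getElem?_cons_succ]
      rw [h8, ih _ hnn, hdd]

-- the k-th element of run's output
theorem pvRun_getElem? (a : Int) (ha : 0 ≤ a) (k : Nat) :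
    (pvRun a)[k]? = if k ≠ 0 ∧ a / 8 ^ k = 0 then none else some (pvDigitA (a / 8 ^ k)) := by
  cases k with
  | zero => simp [pvRun, pow_zero]
  | succ k =>
    have h8 : a >>> (3 : Nat) = a / 8 := by
      have he := Int.shiftRight_eq_div_pow a 3; norm_num at he; exact he
    have hnn : 0 ≤ a / 8 := Int.ediv_nonneg (by omega) (by norm_num)
    have hdd : a / 8 / 8 ^ k = a / 8 ^ (k + 1) := by
      rw [Int.ediv_ediv_of_nonneg (show (0:Int) ≤ 8 by norm_num), ← pow_succ']
    have hnn2 : 0 ≤ a / 8 ^ (k + 1) := Int.ediv_nonneg ha (by positivity)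
    simp only [pvRun, List.getElem?_cons_succ]
    rw [h8, pvRunLoop_getElem? k _ hnn, hdd]
    by_cases hz : a / 8 ^ (k + 1) = 0
    · simp [hz]
    · rw [if_neg (by omega), if_neg (by simp [hz])]

-- index-in-range for run's output, as A tests it
theorem pvRun_len_iff (a : Int) (ha : 0 ≤ a) (k : Nat) :
    k < (pvRun a).length ↔ (k = 0 ∨ a / 8 ^ k ≠ 0) := by
  have h := pvRun_getElem? a ha k
  constructor
  · intro hk
    by_contra hcon
    push_neg at hcon
    rw [if_pos ⟨hcon.1, hcon.2⟩] at h
    rw [List.getElem?_eq_getElem hk] at h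
    simp at h
  · intro hd
    by_contra hk
    push_neg at hk
    rw [List.getElem?_eq_none_iff.mpr hk] at h
    rw [if_neg (by tauto)] at h
    simp at h

-- the value A reads as out[i]
theorem pvRun_getElem (a : Int) (ha : 0 ≤ a) (k : Nat) (hk : k < (pvRun a).length) :
    (pvRun a)[k] = pvDigitA (a / 8 ^ k) := by
  have h := pvRun_getElem? a ha k
  have hd := (pvRun_len_iff a ha k).mp hk
  rw [if_neg (by tauto), List.getElem?_eq_getElem hk] at h
  exact Option.some.inj h

-- A's branch condition equals B's branch condition, compared digit included
theorem pvCond_iff (a i q : Int) (ha : 0 ≤ a) (hi : 0 ≤ i) :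
    (i < ((pvRun a).length : Int) ∧ PySem.List.pyGetD (pvRun a) i 0 = q)
    ↔ ((i = 0 ∨ a >>> (3 * i).toNat ≠ 0) ∧ pvDigitA (a >>> (3 * i).toNat) = q) := by
  obtain ⟨k, rfl⟩ : ∃ k : Nat, i = (k : Int) := ⟨i.toNat, (Int.toNat_of_nonneg hi).symm⟩
  have h3k : ((3 : Int) * (k : Int)).toNat = 3 * k := by omega
  have hshr : a >>> (3 * k) = a / 8 ^ k := by
    rw [Int.shiftRight_eq_div_pow, pow_mul]; norm_num
  rw [h3k, hshr]
  constructor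
  · rintro ⟨hlt, hval⟩
    have hk : k < (pvRun a).length := by exact_mod_cast hlt
    have hget : PySem.List.pyGetD (pvRun a) (k : Int) 0 = pvDigitA (a / 8 ^ k) := by
      rw [PySem.List.pyGetD_eq_getElem (pvRun a) 0 (Int.natCast_nonneg k) hlt]
      simp only [Int.toNat_natCast]
      exact pvRun_getElem a ha k hk
    refine ⟨?_, hget.symm.trans hval⟩
    have := (pvRun_len_iff a ha k).mp hk
    simpa using this
  · rintro ⟨hd, hval⟩
    have hd' : k = 0 ∨ a / 8 ^ k ≠ 0 := by simpa using hd
    have hk : k < (pvRun a).length := (pvRun_len_iff a ha k).mpr hd'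
    have hlt : (k : Int) < ((pvRun a).length : Int) := by exact_mod_cast hk
    have hget : PySem.List.pyGetD (pvRun a) (k : Int) 0 = pvDigitA (a / 8 ^ k) := by
      rw [PySem.List.pyGetD_eq_getElem (pvRun a) 0 (Int.natCast_nonneg k) hlt]
      simp only [Int.toNat_natCast]
      exact pvRun_getElem a ha k hk
    exact ⟨hlt, hget.trans hval⟩

-- the two searches agree for any fuel, on nonnegative i, low, low_bits
theorem pvGo_eq (fuel : Nat) : ∀ (program : List Int) (i low low_bits : Int),
    0 ≤ i → 0 ≤ low → 0 ≤ low_bits →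
    pvGoA program fuel i low low_bits = pvGoB program fuel i low low_bits := by
  induction fuel with
  | zero => intro program i low lb _ _ _; rfl
  | succ n ih =>
    intro program i low lb hi hlow hlb
    simp only [pvGoA, pvGoB]
    apply PySem.List.foldl_congr_mem
    intro acc high hmem
    have hhigh : 0 ≤ high := ((PySem.List.mem_pyRange_one).mp hmem).1
    set a : Int := (high <<< lb.toNat) + low with hadef
    have ha : 0 ≤ a := by
      have h1 : high <<< lb.toNat = high * 2 ^ lb.toNat := Int.shiftLeft_eq high lb.toNat
      have h2 : 0 ≤ high <<< lb.toNat := by rw [h1]; positivity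
      omega
    have hcond := pvCond_iff a i (PySem.List.pyGetD program i 0) ha hi
    have hrec : pvGoA program n (i + 1) a (lb + 3) = pvGoB program n (i + 1) a (lb + 3) :=
      ih program (i + 1) a (lb + 3) (by omega) ha (by omega)
    by_cases hc : i < ((pvRun a).length : Int) ∧
        PySem.List.pyGetD (pvRun a) i 0 = PySem.List.pyGetD program i 0
    · have hcB : (i = 0 ∨ a >>> (3 * i).toNat ≠ 0) ∧
          PySem.Int.mod (PySem.Int.bxor (PySem.Int.mod (a >>> (3 * i).toNat) 8)
            ((a >>> (3 * i).toNat) >>> (PySem.Int.bxor (PySem.Int.mod (a >>> (3 * i).toNat) 8) 7).toNat)) 8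
            = PySem.List.pyGetD program i 0 := hcond.mp hc
      rw [if_pos hc, if_pos hcB, hrec]
    · have hcBn : ¬ ((i = 0 ∨ a >>> (3 * i).toNat ≠ 0) ∧
          PySem.Int.mod (PySem.Int.bxor (PySem.Int.mod (a >>> (3 * i).toNat) 8)
            ((a >>> (3 * i).toNat) >>> (PySem.Int.bxor (PySem.Int.mod (a >>> (3 * i).toNat) 8) 7).toNat)) 8
            = PySem.List.pyGetD program i 0) := fun h => hc (hcond.mpr h)
      rw [if_neg hc, if_neg hcBn]

-- ===== VERDICT (by name: the statement is the Claim_ definition above) =====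
theorem find_quines_rec_spec : Claim_equal_find_quines_rec := by
  intro program i low lb _ hpre
  unfold Spec_find_quines_rec find_quines_rec find_quines_rec_alt
  exact pvGo_eq _ program i low lb hpre.1 hpre.2.1 hpre.2.2.1
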